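-- pv_equiv track=rewrite | github.com/tolebishka/AiDocTranslation | backend/app/services/mrz_service.py | compute_check_digit
-- ===== SOURCE A (Python) =====
-- def compute_check_digit(data: str) -> str:
--     """
--     Compute MRZ check digit according to ICAO 9303.
--     Weights cycle: 7, 3, 1
--     """
--     weights = [7, 3, 1]
--     total = 0
--
--     for i, char in enumerate(data):
--         if "0" <= char <= "9":
--             value = ord(char) - ord("0")
--         elif "A" <= char <= "Z":
--             value = ord(char) - ord("A") + 10
--         elif char == "<":
--             value = 0
--         else:
--             value = 0
--
--         total += value * weights[i % 3]
--
--     return str(total % 10)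
-- ===== SOURCE B (Python) =====
-- def compute_check_digit(data: str) -> str:
--     def value(ch):
--         o = ord(ch)
--         if 48 <= o <= 57:
--             return o - 48
--         if 65 <= o <= 90:
--             return o - 55
--         return 0
--     s0 = sum(value(c) for c in data[0::3])
--     s1 = sum(value(c) for c in data[1::3])
--     s2 = sum(value(c) for c in data[2::3])
--     return str((7 * s0 + 3 * s1 + s2) % 10)
-- ===== Notes on version B (the rewrite author's own statement) =====
-- stated objective: alternative
-- what changed: Replaces the single indexed loop with a cycling weight table by three residue-class slice sums (data[0::3], data[1::3], data[2::3]) combined as 7*S0+3*S1+S2.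
import Mathlib
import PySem

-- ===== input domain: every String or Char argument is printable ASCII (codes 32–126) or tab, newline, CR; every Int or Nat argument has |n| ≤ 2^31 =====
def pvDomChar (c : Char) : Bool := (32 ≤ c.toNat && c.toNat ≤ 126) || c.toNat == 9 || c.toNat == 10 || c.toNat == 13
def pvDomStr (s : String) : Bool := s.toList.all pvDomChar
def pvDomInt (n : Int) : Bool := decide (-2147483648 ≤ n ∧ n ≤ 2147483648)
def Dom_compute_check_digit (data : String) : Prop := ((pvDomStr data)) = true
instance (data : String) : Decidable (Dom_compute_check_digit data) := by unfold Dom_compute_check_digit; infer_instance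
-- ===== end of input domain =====

-- B computes the check digit from three residue-class slice sums (data[0::3], [1::3], [2::3]) instead of A's single indexed loop with a cycling weight table; alternative decomposition, same cost.


-- ===== PORT A =====
-- A's per-character value: the if/elif chain comparing char against '0'..'9', 'A'..'Z', '<'
def pvAVal (c : Char) : Int :=
  if '0' ≤ c ∧ c ≤ '9' then (c.toNat : Int) - ('0'.toNat : Int)
  else if 'A' ≤ c ∧ c ≤ 'Z' then (c.toNat : Int) - ('A'.toNat : Int) + 10
  else if c = '<' then 0
  else 0

-- the for-loop over enumerate(data), accumulating total; weights[i % 3] via getD (i % 3 < 3 always)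
def pvALoop : List Char → Nat → Int → Int
  | [], _, total => total
  | c :: rest, i, total => pvALoop rest (i + 1) (total + pvAVal c * ([7, 3, 1] : List Int).getD (i % 3) 0)

def compute_check_digit (data : String) : String :=
  PySem.Int.toStr (PySem.Int.mod (pvALoop data.toList 0 0) 10)

-- ===== PORT B =====
-- B's ord-based value helper
def pvBVal (c : Char) : Int :=
  if 48 ≤ c.toNat ∧ c.toNat ≤ 57 then (c.toNat : Int) - 48
  else if 65 ≤ c.toNat ∧ c.toNat ≤ 90 then (c.toNat : Int) - 55
  else 0

-- xs[0::3]: every third element (exact port of Python step-3 slicing from index 0)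
def pvEvery3 : List Char → List Char
  | [] => []
  | [a] => [a]
  | [a, _] => [a]
  | a :: _ :: _ :: rest => a :: pvEvery3 rest

-- sum(value(c) for c in xs)
def pvBSum (xs : List Char) : Int := (xs.map pvBVal).sum

def compute_check_digit_alt (data : String) : String :=
  let l := data.toList
  let s0 := pvBSum (pvEvery3 l)
  let s1 := pvBSum (pvEvery3 (l.drop 1))
  let s2 := pvBSum (pvEvery3 (l.drop 2))
  PySem.Int.toStr (PySem.Int.mod (7 * s0 + 3 * s1 + s2) 10)

-- ===== PRECONDITION & SPEC =====
def Spec_compute_check_digit (data : String) (out : String) : Prop := out = compute_check_digit_alt data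
instance (data : String) (out : String) : Decidable (Spec_compute_check_digit data out) := by unfold Spec_compute_check_digit; infer_instance

-- ===== CLAIM (what is proved, stated in full; the proofs are below) =====
def Claim_equal_compute_check_digit : Prop := ∀ (data : String), Dom_compute_check_digit data → Spec_compute_check_digit data (compute_check_digit data)

-- ===== LEMMAS AND PROOFS =====

theorem pvVal_eq (c : Char) : pvAVal c = pvBVal c := by
  unfold pvAVal pvBVal
  have h0 : ('0' ≤ c ∧ c ≤ '9') ↔ (48 ≤ c.toNat ∧ c.toNat ≤ 57) := by
    simp only [Char.le_def, UInt32.le_iff_toNat_le, Char.toNat]; exact Iff.rfl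
  have h1 : ('A' ≤ c ∧ c ≤ 'Z') ↔ (65 ≤ c.toNat ∧ c.toNat ≤ 90) := by
    simp only [Char.le_def, UInt32.le_iff_toNat_le, Char.toNat]; exact Iff.rfl
  rw [if_congr h0 rfl rfl, if_congr h1 rfl rfl]
  split_ifs <;> simp <;> omega

theorem pvEvery3_cons (c : Char) (rest : List Char) :
    pvEvery3 (c :: rest) = c :: pvEvery3 (rest.drop 2) := by
  match rest with
  | [] => rfl
  | [_] => rfl
  | _ :: _ :: r => rfl

def pvWt (i : Nat) : Int := ([7, 3, 1] : List Int).getD (i % 3) 0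

theorem pvALoop_eq (l : List Char) : ∀ (i : Nat) (t : Int),
    pvALoop l i t =
      t + pvWt i * pvBSum (pvEvery3 l)
        + pvWt (i + 1) * pvBSum (pvEvery3 (l.drop 1))
        + pvWt (i + 2) * pvBSum (pvEvery3 (l.drop 2)) := by
  induction l with
  | nil => intro i t; simp [pvALoop, pvEvery3, pvBSum]
  | cons c rest ih =>
    intro i t
    have hw : pvWt (i + 3) = pvWt i := by unfold pvWt; congr 1; omega
    calc pvALoop (c :: rest) i t
        = pvALoop rest (i + 1) (t + pvAVal c * pvWt i) := rfl
      _ = t + pvAVal c * pvWt i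
            + pvWt (i + 1) * pvBSum (pvEvery3 rest)
            + pvWt (i + 2) * pvBSum (pvEvery3 (rest.drop 1))
            + pvWt (i + 3) * pvBSum (pvEvery3 (rest.drop 2)) := by rw [ih]
      _ = _ := by
            rw [hw, pvVal_eq, pvEvery3_cons]
            simp [pvBSum]
            ring

-- ===== VERDICT (by name: the statement is the Claim_ definition above) =====
theorem compute_check_digit_spec : Claim_equal_compute_check_digit := by
  intro data _
  unfold Spec_compute_check_digit compute_check_digit compute_check_digit_alt
  rw [pvALoop_eq]
  norm_num [pvWt]
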